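-- pv_equiv track=rewrite | github.com/tdw419/ai_project_management | aipm/rag_context.py | _extract_file_diff
-- ===== SOURCE A (Python) =====
-- def _extract_file_diff(file_path: str, full_diff: str) -> str:
--     """Extract the diff section for a specific file"""
--     lines = full_diff.split('\n')
--     result = []
--     in_file = False
--
--     for line in lines:
--         if line.startswith('diff --git'):
--             # Check if this is our file
--             if file_path in line:
--                 in_file = True
--                 result = [line]
--             else:
--                 in_file = False
--         elif in_file:
--             result.append(line)
--
--     return '\n'.join(result)
-- ===== SOURCE B (Python) =====
-- def _extract_file_diff(file_path: str, full_diff: str) -> str: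
--     """Extract the diff section for a specific file.
--
--     Group-then-select: partition the diff into per-file blocks (each tagged at
--     construction with whether its header mentions file_path), then scan the
--     blocks in reverse and return the last-occurring matching block.
--     """
--     blocks = []          # finished (matched, lines) blocks, in order
--     current = None       # the block being built, or None before the first header
--     for line in full_diff.split('\n'):
--         if line.startswith('diff --git'):
--             if current is not None:
--                 blocks.append(current)
--             current = (file_path in line, [line])
--         elif current is not None:
--             current[1].append(line)
--     if current is not None:
--         blocks.append(current)
--     for matched, block in reversed(blocks):
--         if matched:
--             return '\n'.join(block)
--     return ''
-- ===== Notes on version B (the rewrite author's own statement) =====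
-- stated objective: alternative
-- what changed: Replaces A's inline boolean state machine (in_file flag with a result list overwritten in place) by a group-then-select pass: the diff is first partitioned into per-file blocks tagged with whether their header matches, then the last matching block is picked by a reverse scan.
import Mathlib
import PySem

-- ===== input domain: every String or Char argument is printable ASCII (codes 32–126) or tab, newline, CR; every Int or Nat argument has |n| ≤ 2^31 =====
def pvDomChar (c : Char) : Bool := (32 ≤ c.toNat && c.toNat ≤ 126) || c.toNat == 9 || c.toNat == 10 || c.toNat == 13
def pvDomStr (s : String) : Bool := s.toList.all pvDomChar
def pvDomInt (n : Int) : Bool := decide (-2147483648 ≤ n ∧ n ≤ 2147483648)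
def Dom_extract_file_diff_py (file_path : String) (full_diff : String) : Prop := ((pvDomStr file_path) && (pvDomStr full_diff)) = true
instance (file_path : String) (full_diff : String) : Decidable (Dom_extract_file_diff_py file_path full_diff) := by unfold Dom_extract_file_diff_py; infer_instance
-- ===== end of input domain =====

-- B replaces A's inline in_file/result state machine by a group-then-select pass over
-- per-file blocks tagged at construction (objective: alternative, same cost).

-- ===== PORT A =====
-- A's loop body: state is (result, in_file)
def aStep (file_path : String) (st : List String × Bool) (line : String) : List String × Bool :=
  if PySem.Str.startswith line "diff --git" then
    if PySem.Str.isIn file_path line then ([line], true) else (st.1, false)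
  else if st.2 then (st.1 ++ [line], true) else st

def extract_file_diff_py (file_path : String) (full_diff : String) : String :=
  let lines := (PySem.Str.split? full_diff "\n").getD []
  let st := lines.foldl (aStep file_path) ([], false)
  PySem.Str.join "\n" st.1

-- ===== PORT B =====
-- B's loop body: state is (finished blocks, current block being built);
-- each block carries the matched flag computed at its header line.
def bStep (file_path : String)
    (st : List (Bool × List String) × Option (Bool × List String)) (line : String) :
    List (Bool × List String) × Option (Bool × List String) :=
  if PySem.Str.startswith line "diff --git" then
    (st.1 ++ st.2.toList, some (PySem.Str.isIn file_path line, [line]))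
  else
    match st.2 with
    | some (m, b) => (st.1, some (m, b ++ [line]))
    | none => st

def extract_file_diff_py_alt (file_path : String) (full_diff : String) : String :=
  let lines := (PySem.Str.split? full_diff "\n").getD []
  let st := lines.foldl (bStep file_path) ([], none)
  let blocks := st.1 ++ st.2.toList
  match blocks.reverse.find? (·.1) with
  | some (_, b) => PySem.Str.join "\n" b
  | none => ""

-- ===== PRECONDITION & SPEC =====
def Spec_extract_file_diff_py (file_path : String) (full_diff : String) (out : String) : Prop := out = extract_file_diff_py_alt file_path full_diff
instance (file_path : String) (full_diff : String) (out : String) : Decidable (Spec_extract_file_diff_py file_path full_diff out) := by unfold Spec_extract_file_diff_py; infer_instance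

-- ===== CLAIM (what is proved, stated in full; the proofs are below) =====
def Claim_equal_extract_file_diff_py : Prop := ∀ (file_path : String) (full_diff : String), Dom_extract_file_diff_py file_path full_diff → Spec_extract_file_diff_py file_path full_diff (extract_file_diff_py file_path full_diff)

-- ===== LEMMAS AND PROOFS =====

-- the block B selects: last element of the block list whose flag is set
def pvPick (xs : List (Bool × List String)) : Option (Bool × List String) :=
  xs.reverse.find? (·.1)

lemma pvPick_append_true (xs : List (Bool × List String)) (b : List String) :
    pvPick (xs ++ [(true, b)]) = some (true, b) := by
  simp [pvPick]

lemma pvPick_append_false (xs : List (Bool × List String)) (b : List String) :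
    pvPick (xs ++ [(false, b)]) = pvPick xs := by
  simp [pvPick]

-- the simulation relation between A's state and B's state
def pvRel (s : List String × Bool)
    (t : List (Bool × List String) × Option (Bool × List String)) : Prop :=
  s.1 = ((pvPick (t.1 ++ t.2.toList)).map Prod.snd).getD [] ∧
  s.2 = (t.2.map Prod.fst).getD false

lemma pvRel_step (fp : String) (s : List String × Bool)
    (t : List (Bool × List String) × Option (Bool × List String)) (line : String)
    (h : pvRel s t) : pvRel (aStep fp s line) (bStep fp t line) := by
  obtain ⟨h1, h2⟩ := h
  unfold aStep bStep pvRel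
  by_cases hs : PySem.Str.startswith line "diff --git" = true
  · rw [if_pos hs, if_pos hs]
    by_cases hin : PySem.Str.isIn fp line = true
    · -- matching header: the fresh current block is the picked one
      rw [if_pos hin, hin]
      refine ⟨?_, rfl⟩
      dsimp only
      simp only [Option.toList_some, pvPick_append_true]
      rfl
    · -- non-matching header: the pick is unchanged
      have hin' : PySem.Str.isIn fp line = false := by simpa using hin
      rw [if_neg hin, hin']
      refine ⟨?_, rfl⟩
      dsimp only
      simp only [Option.toList_some, pvPick_append_false]
      exact h1
  · rw [if_neg hs, if_neg hs]
    rcases ht : t.2 with _ | ⟨m, b⟩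
    · -- before the first header: both states unchanged
      rw [ht] at h1 h2
      simp only [Option.map_none, Option.getD_none] at h2
      simp [ht, h2, h1]
    · rw [ht] at h1 h2
      simp only [Option.map_some, Option.getD_some] at h2
      cases m with
      | true =>
        -- inside the (currently last, matching) block: both sides append the line
        have hb : s.1 = b := by
          simpa [pvPick_append_true] using h1
        simp [h2, hb, pvPick_append_true]
      | false =>
        -- inside a non-matching block: the pick ignores it
        simp only [h2, Bool.false_eq_true, if_false]
        refine ⟨?_, by simp⟩
        simp only [Option.toList_some, pvPick_append_false] at h1 ⊢
        exact h1

lemma pvRel_foldl (fp : String) (lines : List String) (s : List String × Bool)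
    (t : List (Bool × List String) × Option (Bool × List String))
    (h : pvRel s t) :
    pvRel (lines.foldl (aStep fp) s) (lines.foldl (bStep fp) t) := by
  induction lines generalizing s t with
  | nil => exact h
  | cons l ls ih => exact ih _ _ (pvRel_step fp s t l h)

-- ===== VERDICT (by name: the statement is the Claim_ definition above) =====
theorem extract_file_diff_py_spec : Claim_equal_extract_file_diff_py := by
  intro fp fd _
  unfold Spec_extract_file_diff_py extract_file_diff_py extract_file_diff_py_alt
  dsimp only
  generalize (PySem.Str.split? fd "\n").getD [] = lines
  obtain ⟨h1, -⟩ := pvRel_foldl fp lines ([], false) ([], none) ⟨rfl, rfl⟩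
  cases hp : pvPick ((lines.foldl (bStep fp) ([], none)).1 ++
      (lines.foldl (bStep fp) ([], none)).2.toList) with
  | none =>
    rw [hp] at h1
    simp only [Option.map_none, Option.getD_none] at h1
    simp only [pvPick] at hp
    rw [h1]
    simp only [hp]
    decide
  | some p =>
    obtain ⟨m, b⟩ := p
    rw [hp] at h1
    simp only [Option.map_some, Option.getD_some] at h1
    simp only [pvPick] at hp
    rw [h1]
    simp only [hp]
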